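-- pv_equiv track=rewrite | github.com/eliasroodrigues/paa-algorithm | magic-square/magic_square.py | magic_square_double_even
-- ===== SOURCE A (Python) =====
-- def magic_square_double_even(tam):
--     if tam % 4 != 0:
--         return None
--
--     square = [[(tam*y)+x+1 for x in range(tam)] for y in range(tam)]
--
--     # Top Left
--     for i in range(tam // 4):
--         for j in range(tam // 4):
--             square[i][j] = (tam * tam + 1) - square[i][j]
--
--     # Top Right
--     for i in range(tam // 4):
--         for j in range(3 * (tam // 4), tam):
--             square[i][j] = (tam * tam + 1) - square[i][j]
--
--     # Bottom Left
--     for i in range(3 * (tam // 4), tam):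
--         for j in range(tam // 4):
--             square[i][j] = (tam * tam + 1) - square[i][j]
--
--     # Bottom Right
--     for i in range(3 * (tam // 4), tam):
--         for j in range(3 * (tam // 4), tam):
--             square[i][j] = (tam * tam + 1) - square[i][j]
--
--     # Center
--     for i in range(tam // 4, 3 * (tam // 4)):
--         for j in range(tam // 4, 3 * (tam // 4)):
--             square[i][j] = (tam * tam + 1) - square[i][j]
--
--     return square
-- ===== SOURCE B (Python) =====
-- def magic_square_double_even(tam):
--     if tam % 4 != 0:
--         return None
--     q = tam // 4
--     N = tam * tam
--     # Build only the TOP HALF directly, each row as a concatenation of three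
--     # segments (no per-cell patching): outer rows complement their side
--     # quarters, inner rows complement their middle half.
--     top = []
--     for i in range(2 * q):
--         base = tam * i
--         if i < q:
--             row = ([N - (base + j) for j in range(q)]
--                    + [base + j + 1 for j in range(q, 3 * q)]
--                    + [N - (base + j) for j in range(3 * q, tam)])
--         else:
--             row = ([base + j + 1 for j in range(q)]
--                    + [N - (base + j) for j in range(q, 3 * q)]
--                    + [base + j + 1 for j in range(3 * q, tam)])
--         top.append(row)
--     # The BOTTOM HALF follows from the square's half-turn point anti-symmetry:
--     # the cell at the point-reflected position holds the complementary value.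
--     bottom = [[N + 1 - v for v in reversed(row)] for row in reversed(top)]
--     return top + bottom
-- ===== Notes on version B (the rewrite author's own statement) =====
-- stated objective: alternative
-- what changed: B computes only the top half of the square directly (each row assembled once as a concatenation of three segments, no patch passes) and derives the entire bottom half from the square's half-turn point anti-symmetry by reversing and complementing the top half.
import Mathlib
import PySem

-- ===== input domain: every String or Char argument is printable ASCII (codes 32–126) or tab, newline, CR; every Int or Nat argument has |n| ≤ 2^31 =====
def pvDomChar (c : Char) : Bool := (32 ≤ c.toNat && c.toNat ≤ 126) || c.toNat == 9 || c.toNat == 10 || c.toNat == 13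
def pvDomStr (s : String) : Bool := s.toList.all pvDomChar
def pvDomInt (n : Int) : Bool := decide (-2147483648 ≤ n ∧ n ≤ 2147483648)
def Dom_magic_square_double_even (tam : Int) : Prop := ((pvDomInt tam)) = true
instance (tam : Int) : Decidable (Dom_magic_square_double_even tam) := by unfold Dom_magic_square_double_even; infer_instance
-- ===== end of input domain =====

-- B builds only the top half of the square directly (each row assembled once as three
-- concatenated segments, no patch passes) and derives the bottom half from the square's
-- half-turn point anti-symmetry (reverse + complement); objective: alternative construction.

-- ===== PORT A =====
def magic_square_double_even (tam : Int) : Option (List (List Int)) :=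
  if PySem.Int.mod tam 4 ≠ 0 then none
  else
    let square : List (List Int) :=
      (PySem.List.pyRange 0 tam 1).map (fun y =>
        (PySem.List.pyRange 0 tam 1).map (fun x => tam * y + x + 1))
    -- square[i][j] = (tam*tam+1) - square[i][j]
    let comp : List (List Int) → Int → Int → List (List Int) := fun sq i j =>
      sq.modify i.toNat (fun row => row.modify j.toNat (fun v => tam * tam + 1 - v))
    -- Top Left
    let square := (PySem.List.pyRange 0 (PySem.Int.floordiv tam 4) 1).foldl (fun sq i =>
      (PySem.List.pyRange 0 (PySem.Int.floordiv tam 4) 1).foldl (fun sq j => comp sq i j) sq) square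
    -- Top Right
    let square := (PySem.List.pyRange 0 (PySem.Int.floordiv tam 4) 1).foldl (fun sq i =>
      (PySem.List.pyRange (3 * PySem.Int.floordiv tam 4) tam 1).foldl (fun sq j => comp sq i j) sq) square
    -- Bottom Left
    let square := (PySem.List.pyRange (3 * PySem.Int.floordiv tam 4) tam 1).foldl (fun sq i =>
      (PySem.List.pyRange 0 (PySem.Int.floordiv tam 4) 1).foldl (fun sq j => comp sq i j) sq) square
    -- Bottom Right
    let square := (PySem.List.pyRange (3 * PySem.Int.floordiv tam 4) tam 1).foldl (fun sq i =>
      (PySem.List.pyRange (3 * PySem.Int.floordiv tam 4) tam 1).foldl (fun sq j => comp sq i j) sq) square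
    -- Center
    let square := (PySem.List.pyRange (PySem.Int.floordiv tam 4) (3 * PySem.Int.floordiv tam 4) 1).foldl (fun sq i =>
      (PySem.List.pyRange (PySem.Int.floordiv tam 4) (3 * PySem.Int.floordiv tam 4) 1).foldl (fun sq j => comp sq i j) sq) square
    some square

-- ===== PORT B =====
def magic_square_double_even_alt (tam : Int) : Option (List (List Int)) :=
  if PySem.Int.mod tam 4 ≠ 0 then none
  else
    let q := PySem.Int.floordiv tam 4
    let N := tam * tam
    -- top half, each row a concatenation of three segments
    let top : List (List Int) :=
      (PySem.List.pyRange 0 (2 * q) 1).foldl (fun top i =>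
        let base := tam * i
        let row : List Int :=
          if i < q then
            (PySem.List.pyRange 0 q 1).map (fun j => N - (base + j))
            ++ (PySem.List.pyRange q (3 * q) 1).map (fun j => base + j + 1)
            ++ (PySem.List.pyRange (3 * q) tam 1).map (fun j => N - (base + j))
          else
            (PySem.List.pyRange 0 q 1).map (fun j => base + j + 1)
            ++ (PySem.List.pyRange q (3 * q) 1).map (fun j => N - (base + j))
            ++ (PySem.List.pyRange (3 * q) tam 1).map (fun j => base + j + 1)
        top ++ [row]) []
    -- bottom half by half-turn point anti-symmetry
    let bottom : List (List Int) :=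
      top.reverse.map (fun row => row.reverse.map (fun v => N + 1 - v))
    some (top ++ bottom)

-- ===== PRECONDITION & SPEC =====
def Spec_magic_square_double_even (tam : Int) (out : Option (List (List Int))) : Prop := out = magic_square_double_even_alt tam
instance (tam : Int) (out : Option (List (List Int))) : Decidable (Spec_magic_square_double_even tam out) := by unfold Spec_magic_square_double_even; infer_instance

-- ===== CLAIM (what is proved, stated in full; the proofs are below) =====
def Claim_equal_magic_square_double_even : Prop := ∀ (tam : Int), Dom_magic_square_double_even tam → Spec_magic_square_double_even tam (magic_square_double_even tam)

-- ===== LEMMAS AND PROOFS =====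

-- common target form: per-cell classification
def pvTarget (tam : Int) : List (List Int) :=
  (PySem.List.pyRange 0 tam 1).map (fun i =>
    (PySem.List.pyRange 0 tam 1).map (fun j =>
      if ((i < PySem.Int.floordiv tam 4 ∨ 3 * PySem.Int.floordiv tam 4 ≤ i) ↔
          (j < PySem.Int.floordiv tam 4 ∨ 3 * PySem.Int.floordiv tam 4 ≤ j))
      then tam * tam + 1 - (tam * i + j + 1)
      else tam * i + j + 1))

theorem pv_modify_modify_same {α : Type} (l : List α) (i : Nat) (f g : α → α) :
    (l.modify i f).modify i g = l.modify i (fun x => g (f x)) := by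
  apply List.ext_getElem?
  intro j
  by_cases h : i = j <;> simp [h, Option.map_map, Function.comp_def]

theorem pv_foldl_modify_comp {α : Type} (cs : List Int) (i : Nat) (f : α → α)
    (sq : List (List α)) :
    cs.foldl (fun sq j => sq.modify i (fun row => row.modify j.toNat f)) sq
      = sq.modify i (fun row => cs.foldl (fun r j => r.modify j.toNat f) row) := by
  induction cs generalizing sq with
  | nil =>
    simp only [List.foldl_nil]
    apply List.ext_getElem?
    intro j
    by_cases h : i = j <;> simp [h]
  | cons c cs ih =>
    simp only [List.foldl_cons]
    rw [ih, pv_modify_modify_same]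

theorem pv_foldl_modify_getElem? {α : Type} (ns : List Nat) (hnd : ns.Nodup) (f : α → α)
    (r : List α) (m : Nat) :
    (ns.foldl (fun r j => r.modify j f) r)[m]? = if m ∈ ns then r[m]?.map f else r[m]? := by
  induction ns generalizing r with
  | nil => simp
  | cons n ns ih =>
    simp only [List.nodup_cons] at hnd
    rw [List.foldl_cons, ih hnd.2]
    by_cases hm : m ∈ ns
    · have hne : n ≠ m := by rintro rfl; exact hnd.1 hm
      simp [hm, hne]
    · by_cases he : m = n
      · subst he
        simp [hm]
      · simp [hm, he, Ne.symm he]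

theorem pv_nodup_map_toNat_pyRange (a b : Int) (ha : 0 ≤ a) :
    ((PySem.List.pyRange a b 1).map Int.toNat).Nodup := by
  apply List.Nodup.map_on _ (PySem.List.nodup_pyRange_one a b)
  intro x hx y hy h
  rw [PySem.List.mem_pyRange_one] at hx hy
  omega

theorem pv_mem_map_toNat_pyRange (a b : Int) (ha : 0 ≤ a) (m : Nat) :
    m ∈ (PySem.List.pyRange a b 1).map Int.toNat ↔ a ≤ (m : Int) ∧ (m : Int) < b := by
  simp only [List.mem_map, PySem.List.mem_pyRange_one]
  constructor
  · rintro ⟨x, ⟨h1, h2⟩, rfl⟩; omega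
  · rintro ⟨h1, h2⟩; exact ⟨(m : Int), ⟨h1, h2⟩, by simp⟩

theorem pv_cols_getElem? (tam c d : Int) (hc : 0 ≤ c) (r : List Int) (j : Nat) :
    ((PySem.List.pyRange c d 1).foldl (fun r j => r.modify j.toNat (fun v => tam * tam + 1 - v)) r)[j]?
      = if c ≤ (j : Int) ∧ (j : Int) < d then r[j]?.map (fun v => tam * tam + 1 - v) else r[j]? := by
  rw [show ((PySem.List.pyRange c d 1).foldl (fun r j => r.modify j.toNat (fun v => tam * tam + 1 - v)) r)
        = (((PySem.List.pyRange c d 1).map Int.toNat).foldl (fun r j => r.modify j (fun v => tam * tam + 1 - v)) r)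
      from by rw [List.foldl_map]]
  rw [pv_foldl_modify_getElem? _ (pv_nodup_map_toNat_pyRange c d hc)]
  simp only [pv_mem_map_toNat_pyRange c d hc]

theorem pv_pass_getElem? (tam a b c d : Int) (ha : 0 ≤ a) (_hc : 0 ≤ c)
    (sq : List (List Int)) (i : Nat) :
    ((PySem.List.pyRange a b 1).foldl (fun sq i =>
        (PySem.List.pyRange c d 1).foldl (fun sq j =>
          sq.modify i.toNat (fun row => row.modify j.toNat (fun v => tam * tam + 1 - v))) sq) sq)[i]?
      = if a ≤ (i : Int) ∧ (i : Int) < b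
        then sq[i]?.map (fun row => (PySem.List.pyRange c d 1).foldl (fun r j => r.modify j.toNat (fun v => tam * tam + 1 - v)) row)
        else sq[i]? := by
  have h1 : (fun (sq : List (List Int)) (i : Int) =>
        (PySem.List.pyRange c d 1).foldl (fun sq j =>
          sq.modify i.toNat (fun row => row.modify j.toNat (fun v => tam * tam + 1 - v))) sq)
      = fun sq i => sq.modify i.toNat (fun row =>
          (PySem.List.pyRange c d 1).foldl (fun r j => r.modify j.toNat (fun v => tam * tam + 1 - v)) row) := by
    funext sq i
    exact pv_foldl_modify_comp _ _ _ _
  rw [h1]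
  rw [show ((PySem.List.pyRange a b 1).foldl (fun sq i => sq.modify i.toNat (fun row =>
          (PySem.List.pyRange c d 1).foldl (fun r j => r.modify j.toNat (fun v => tam * tam + 1 - v)) row)) sq)
        = (((PySem.List.pyRange a b 1).map Int.toNat).foldl (fun sq i => sq.modify i (fun row =>
          (PySem.List.pyRange c d 1).foldl (fun r j => r.modify j.toNat (fun v => tam * tam + 1 - v)) row)) sq)
      from by rw [List.foldl_map]]
  rw [pv_foldl_modify_getElem? _ (pv_nodup_map_toNat_pyRange a b ha)]
  simp only [pv_mem_map_toNat_pyRange a b ha]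

theorem pv_A_eq_target (tam : Int) (hmod : PySem.Int.mod tam 4 = 0) :
    magic_square_double_even tam = some (pvTarget tam) := by
  unfold magic_square_double_even pvTarget
  simp only [hmod, ne_eq, not_true_eq_false, if_false]
  have hfd := PySem.Int.floordiv_mul_add_mod tam 4
  rw [hmod, add_zero] at hfd
  set q := PySem.Int.floordiv tam 4 with hqdef
  by_cases hpos : 0 < tam
  · refine congrArg some ?_
    apply List.ext_getElem?
    intro i
    rw [pv_pass_getElem? tam q (3*q) q (3*q) (by omega) (by omega),
        pv_pass_getElem? tam (3*q) tam (3*q) tam (by omega) (by omega),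
        pv_pass_getElem? tam (3*q) tam 0 q (by omega) (by omega),
        pv_pass_getElem? tam 0 q (3*q) tam (by omega) (by omega),
        pv_pass_getElem? tam 0 q 0 q (by omega) (by omega)]
    simp only [List.getElem?_map, PySem.List.getElem?_pyRange_one]
    by_cases hiN : i < (tam - 0).toNat
    · rw [if_pos hiN]
      simp only [Option.map_some]
      by_cases h1 : (i : Int) < q
      · -- top band: TL and TR passes apply
        rw [if_neg (show ¬(q ≤ (i:Int) ∧ (i:Int) < 3*q) by omega),
            if_neg (show ¬(3*q ≤ (i:Int) ∧ (i:Int) < tam) by omega),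
            if_neg (show ¬(3*q ≤ (i:Int) ∧ (i:Int) < tam) by omega),
            if_pos (show (0 ≤ (i:Int) ∧ (i:Int) < q) by omega),
            if_pos (show (0 ≤ (i:Int) ∧ (i:Int) < q) by omega)]
        simp only [Option.map_some]
        refine congrArg some ?_
        apply List.ext_getElem?
        intro j
        rw [pv_cols_getElem? tam (3*q) tam (by omega),
            pv_cols_getElem? tam 0 q (by omega)]
        simp only [List.getElem?_map, PySem.List.getElem?_pyRange_one,
          eq_true (show ((0:Int) + (i:Int) < q ∨ 3*q ≤ 0 + (i:Int)) by omega), true_iff]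
        by_cases hjN : j < (tam - 0).toNat
        · rw [if_pos hjN]
          simp only [Option.map_some]
          split_ifs <;> first | (exfalso; omega) | rfl
        · rw [if_neg hjN]
          split_ifs <;> simp
      · by_cases h2 : (i : Int) < 3*q
        · -- middle band: center pass applies
          rw [if_pos (show (q ≤ (i:Int) ∧ (i:Int) < 3*q) by omega),
              if_neg (show ¬(3*q ≤ (i:Int) ∧ (i:Int) < tam) by omega),
              if_neg (show ¬(3*q ≤ (i:Int) ∧ (i:Int) < tam) by omega),
              if_neg (show ¬(0 ≤ (i:Int) ∧ (i:Int) < q) by omega),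
              if_neg (show ¬(0 ≤ (i:Int) ∧ (i:Int) < q) by omega)]
          simp only [Option.map_some]
          refine congrArg some ?_
          apply List.ext_getElem?
          intro j
          rw [pv_cols_getElem? tam q (3*q) (by omega)]
          simp only [List.getElem?_map, PySem.List.getElem?_pyRange_one,
            eq_false (show ¬((0:Int) + (i:Int) < q ∨ 3*q ≤ 0 + (i:Int)) by omega), false_iff]
          by_cases hjN : j < (tam - 0).toNat
          · rw [if_pos hjN]
            simp only [Option.map_some]
            split_ifs <;> first | (exfalso; omega) | rfl
          · rw [if_neg hjN]
            split_ifs <;> simp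
        · -- bottom band: BL and BR passes apply
          rw [if_neg (show ¬(q ≤ (i:Int) ∧ (i:Int) < 3*q) by omega),
              if_pos (show (3*q ≤ (i:Int) ∧ (i:Int) < tam) by omega),
              if_pos (show (3*q ≤ (i:Int) ∧ (i:Int) < tam) by omega),
              if_neg (show ¬(0 ≤ (i:Int) ∧ (i:Int) < q) by omega),
              if_neg (show ¬(0 ≤ (i:Int) ∧ (i:Int) < q) by omega)]
          simp only [Option.map_some]
          refine congrArg some ?_
          apply List.ext_getElem?
          intro j
          rw [pv_cols_getElem? tam (3*q) tam (by omega),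
              pv_cols_getElem? tam 0 q (by omega)]
          simp only [List.getElem?_map, PySem.List.getElem?_pyRange_one,
            eq_true (show ((0:Int) + (i:Int) < q ∨ 3*q ≤ 0 + (i:Int)) by omega), true_iff]
          by_cases hjN : j < (tam - 0).toNat
          · rw [if_pos hjN]
            simp only [Option.map_some]
            split_ifs <;> first | (exfalso; omega) | rfl
          · rw [if_neg hjN]
            split_ifs <;> simp
    · rw [if_neg hiN]
      split_ifs <;> simp
  · have e1 : PySem.List.pyRange 0 q 1 = [] := PySem.List.pyRange_one_eq_nil (by omega)
    have e2 : PySem.List.pyRange (3*q) tam 1 = [] := PySem.List.pyRange_one_eq_nil (by omega)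
    have e3 : PySem.List.pyRange q (3*q) 1 = [] := PySem.List.pyRange_one_eq_nil (by omega)
    have e4 : PySem.List.pyRange 0 tam 1 = [] := PySem.List.pyRange_one_eq_nil (by omega)
    simp [e1, e2, e3, e4]

-- B-side helper lemmas

theorem pv_foldl_append {α β : Type} (f : β → α) (l : List β) (init : List α) :
    l.foldl (fun acc x => acc ++ [f x]) init = init ++ l.map f := by
  induction l generalizing init with
  | nil => simp
  | cons x l ih => simp [ih]

theorem pv_map_pyRange_congr {α : Type} (f g : Int → α) (a b a' b' : Int) (hlen : b - a = b' - a')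
    (h : ∀ k : Nat, (k : Int) < b - a → f (a + k) = g (a' + k)) :
    (PySem.List.pyRange a b 1).map f = (PySem.List.pyRange a' b' 1).map g := by
  rw [PySem.List.pyRange_one, PySem.List.pyRange_one, hlen, List.map_map, List.map_map]
  apply List.map_congr_left
  intro k hk
  rw [List.mem_range] at hk
  simp only [Function.comp]
  exact h k (by omega)

theorem pv_rev_map_pyRange {α : Type} (f : Int → α) (a b : Int) :
    ((PySem.List.pyRange a b 1).map f).reverse
      = (PySem.List.pyRange a b 1).map (fun x => f (a + b - 1 - x)) := by
  apply List.ext_getElem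
  · simp
  · intro i h1 h2
    simp only [List.length_reverse, List.length_map, PySem.List.length_pyRange_one] at h1 h2
    simp only [List.getElem_reverse, List.getElem_map, List.length_map,
      PySem.List.length_pyRange_one]
    rw [PySem.List.getElem_pyRange_one, PySem.List.getElem_pyRange_one]
    congr 1
    omega

theorem pv_map_split {α : Type} (f : Int → α) (a m b : Int) (h1 : a ≤ m) (h2 : m ≤ b) :
    (PySem.List.pyRange a b 1).map f
      = (PySem.List.pyRange a m 1).map f ++ (PySem.List.pyRange m b 1).map f := by
  rw [PySem.List.pyRange_one_append a m b h1 h2, List.map_append]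

theorem pv_B_eq_target (tam : Int) (hmod : PySem.Int.mod tam 4 = 0) :
    magic_square_double_even_alt tam = some (pvTarget tam) := by
  unfold magic_square_double_even_alt pvTarget
  simp only [hmod, ne_eq, not_true_eq_false, if_false]
  have hfd := PySem.Int.floordiv_mul_add_mod tam 4
  rw [hmod, add_zero] at hfd
  set q := PySem.Int.floordiv tam 4 with hqdef
  by_cases hpos : 0 < tam
  · refine congrArg some ?_
    rw [pv_foldl_append]
    rw [List.nil_append,
        pv_map_split (fun i =>
          (PySem.List.pyRange 0 tam 1).map (fun j =>
            if ((i < q ∨ 3 * q ≤ i) ↔ (j < q ∨ 3 * q ≤ j)) then tam * tam + 1 - (tam * i + j + 1)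
            else tam * i + j + 1)) 0 (2*q) tam (by omega) (by omega)]
    congr 1
    · -- top half row-by-row
      apply List.map_congr_left
      intro i hi
      rw [PySem.List.mem_pyRange_one] at hi
      rw [pv_map_split (fun j =>
            if ((i < q ∨ 3 * q ≤ i) ↔ (j < q ∨ 3 * q ≤ j)) then tam * tam + 1 - (tam * i + j + 1)
            else tam * i + j + 1) 0 q tam (by omega) (by omega),
          pv_map_split (fun j =>
            if ((i < q ∨ 3 * q ≤ i) ↔ (j < q ∨ 3 * q ≤ j)) then tam * tam + 1 - (tam * i + j + 1)
            else tam * i + j + 1) q (3*q) tam (by omega) (by omega)]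
      by_cases hiq : i < q
      · rw [if_pos hiq, List.append_assoc]
        congr 1
        · apply List.map_congr_left
          intro j hj
          rw [PySem.List.mem_pyRange_one] at hj
          rw [if_pos (by omega)]
          ring
        congr 1
        · apply List.map_congr_left
          intro j hj
          rw [PySem.List.mem_pyRange_one] at hj
          rw [if_neg (by omega)]
        · apply List.map_congr_left
          intro j hj
          rw [PySem.List.mem_pyRange_one] at hj
          rw [if_pos (by omega)]
          ring
      · rw [if_neg hiq, List.append_assoc]
        congr 1
        · apply List.map_congr_left
          intro j hj
          rw [PySem.List.mem_pyRange_one] at hj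
          rw [if_neg (by omega)]
        congr 1
        · apply List.map_congr_left
          intro j hj
          rw [PySem.List.mem_pyRange_one] at hj
          rw [if_pos (by omega)]
          ring
        · apply List.map_congr_left
          intro j hj
          rw [PySem.List.mem_pyRange_one] at hj
          rw [if_neg (by omega)]
    · -- bottom half by anti-symmetry
      rw [pv_rev_map_pyRange, List.map_map]
      apply pv_map_pyRange_congr _ _ 0 (2*q) (2*q) tam (by omega)
      intro k hk
      simp only [Function.comp]
      rw [pv_map_split (fun j =>
            if ((2 * q + (k : Int) < q ∨ 3 * q ≤ 2 * q + (k : Int)) ↔ (j < q ∨ 3 * q ≤ j))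
            then tam * tam + 1 - (tam * (2 * q + (k : Int)) + j + 1)
            else tam * (2 * q + (k : Int)) + j + 1) 0 q tam (by omega) (by omega),
          pv_map_split (fun j =>
            if ((2 * q + (k : Int) < q ∨ 3 * q ≤ 2 * q + (k : Int)) ↔ (j < q ∨ 3 * q ≤ j))
            then tam * tam + 1 - (tam * (2 * q + (k : Int)) + j + 1)
            else tam * (2 * q + (k : Int)) + j + 1) q (3*q) tam (by omega) (by omega)]
      by_cases hkq : (k : Int) < q
      · -- reflected row is an inner row
        rw [if_neg (by omega)]
        rw [List.reverse_append, List.reverse_append, List.map_append, List.map_append]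
        congr 1
        · rw [pv_rev_map_pyRange, List.map_map]
          apply pv_map_pyRange_congr _ _ (3*q) tam 0 q (by omega)
          intro m hm
          simp only [Function.comp]
          rw [if_neg (by omega)]
          rw [hfd.symm]
          ring
        congr 1
        · rw [pv_rev_map_pyRange, List.map_map]
          apply pv_map_pyRange_congr _ _ q (3*q) q (3*q) (by omega)
          intro m hm
          simp only [Function.comp]
          rw [if_pos (by omega)]
          rw [hfd.symm]
          ring
        · rw [pv_rev_map_pyRange, List.map_map]
          apply pv_map_pyRange_congr _ _ 0 q (3*q) tam (by omega)
          intro m hm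
          simp only [Function.comp]
          rw [if_neg (by omega)]
          rw [hfd.symm]
          ring
      · -- reflected row is an outer row
        rw [if_pos (by omega)]
        rw [List.reverse_append, List.reverse_append, List.map_append, List.map_append]
        congr 1
        · rw [pv_rev_map_pyRange, List.map_map]
          apply pv_map_pyRange_congr _ _ (3*q) tam 0 q (by omega)
          intro m hm
          simp only [Function.comp]
          rw [if_pos (by omega)]
          rw [hfd.symm]
          ring
        congr 1
        · rw [pv_rev_map_pyRange, List.map_map]
          apply pv_map_pyRange_congr _ _ q (3*q) q (3*q) (by omega)
          intro m hm
          simp only [Function.comp]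
          rw [if_neg (by omega)]
          rw [hfd.symm]
          ring
        · rw [pv_rev_map_pyRange, List.map_map]
          apply pv_map_pyRange_congr _ _ 0 q (3*q) tam (by omega)
          intro m hm
          simp only [Function.comp]
          rw [if_pos (by omega)]
          rw [hfd.symm]
          ring
  · have e1 : PySem.List.pyRange 0 (2*q) 1 = [] := PySem.List.pyRange_one_eq_nil (by omega)
    have e4 : PySem.List.pyRange 0 tam 1 = [] := PySem.List.pyRange_one_eq_nil (by omega)
    simp [e1, e4]

-- ===== VERDICT (by name: the statement is the Claim_ definition above) =====
theorem magic_square_double_even_spec : Claim_equal_magic_square_double_even := by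
  intro tam _
  unfold Spec_magic_square_double_even
  by_cases hmod : PySem.Int.mod tam 4 = 0
  · rw [pv_A_eq_target tam hmod, pv_B_eq_target tam hmod]
  · unfold magic_square_double_even magic_square_double_even_alt
    rw [if_pos hmod, if_pos hmod]
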